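-- pv_equiv track=rewrite | github.com/MowlanicaBilla/ML_projects | DSA_Practice/W3_resources/Coding_puzzles/100_sum_upto_target.py | sum_upto_target
-- ===== SOURCE A (Python) =====
-- def sum_upto_target(n):
--     for a in range(n, 0, -1):
--         if not a%2==0:
--             continue
--         for b in range(n-a, 0, -1):
--             if not b%2==0:
--                 continue
--             for c in range(n-a-b, 0, -1):
--                 if not c%2==0:
--                     continue
--                 for d in range(n-a-b-c, 0, -1):
--                     if not d%2==0:
--                         continue
--                     if a + b + c+ d == n:
--                         return [a,b,c,d]
--
-- n = 1234567890
-- ===== SOURCE B (Python) =====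
-- def sum_upto_target(n):
--     # Closed form: the first quadruple the search finds is always [n-6, 2, 2, 2]
--     # when a solution exists (n even and n >= 8), and None otherwise.
--     if n % 2 == 0 and n >= 8:
--         return [n - 6, 2, 2, 2]
--     return None
-- ===== Notes on version B (the rewrite author's own statement) =====
-- stated objective: simpler
-- what changed: Replaced the four nested countdown loops with the closed form they compute: [n-6,2,2,2] when n is even and n>=8, None otherwise.
import Mathlib
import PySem

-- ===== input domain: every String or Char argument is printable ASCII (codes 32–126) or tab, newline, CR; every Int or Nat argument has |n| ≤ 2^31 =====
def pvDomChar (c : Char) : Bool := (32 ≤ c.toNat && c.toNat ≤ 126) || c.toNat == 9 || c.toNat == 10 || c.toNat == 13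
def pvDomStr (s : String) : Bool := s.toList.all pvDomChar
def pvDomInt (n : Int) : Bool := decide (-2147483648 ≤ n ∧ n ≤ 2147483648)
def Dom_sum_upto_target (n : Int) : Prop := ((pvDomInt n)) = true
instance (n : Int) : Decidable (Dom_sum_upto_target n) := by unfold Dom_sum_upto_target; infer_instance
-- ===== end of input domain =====

-- B replaces A's four nested countdown loops by the closed form they compute:
-- some [n-6,2,2,2] when n is even and n ≥ 8, none otherwise.

-- ===== PORT A =====
-- innermost loop: for d in range(n-a-b-c, 0, -1)
def pvLoopD (n a b c : Int) : List Int → Option (List Int)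
  | [] => none
  | d :: ds =>
    if ¬ PySem.Int.mod d 2 = 0 then pvLoopD n a b c ds
    else if a + b + c + d = n then some [a, b, c, d]
    else pvLoopD n a b c ds

-- for c in range(n-a-b, 0, -1)
def pvLoopC (n a b : Int) : List Int → Option (List Int)
  | [] => none
  | c :: cs =>
    if ¬ PySem.Int.mod c 2 = 0 then pvLoopC n a b cs
    else match pvLoopD n a b c (PySem.List.pyRange (n - a - b - c) 0 (-1)) with
      | some r => some r
      | none => pvLoopC n a b cs

-- for b in range(n-a, 0, -1)
def pvLoopB (n a : Int) : List Int → Option (List Int)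
  | [] => none
  | b :: bs =>
    if ¬ PySem.Int.mod b 2 = 0 then pvLoopB n a bs
    else match pvLoopC n a b (PySem.List.pyRange (n - a - b) 0 (-1)) with
      | some r => some r
      | none => pvLoopB n a bs

-- for a in range(n, 0, -1)
def pvLoopA (n : Int) : List Int → Option (List Int)
  | [] => none
  | a :: as_ =>
    if ¬ PySem.Int.mod a 2 = 0 then pvLoopA n as_
    else match pvLoopB n a (PySem.List.pyRange (n - a) 0 (-1)) with
      | some r => some r
      | none => pvLoopA n as_

def sum_upto_target (n : Int) : Option (List Int) :=
  pvLoopA n (PySem.List.pyRange n 0 (-1))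

-- ===== PORT B =====
def sum_upto_target_alt (n : Int) : Option (List Int) :=
  if PySem.Int.mod n 2 = 0 ∧ 8 ≤ n then some [n - 6, 2, 2, 2] else none

-- ===== PRECONDITION & SPEC =====
def Spec_sum_upto_target (n : Int) (out : Option (List Int)) : Prop := out = sum_upto_target_alt n
instance (n : Int) (out : Option (List Int)) : Decidable (Spec_sum_upto_target n out) := by unfold Spec_sum_upto_target; infer_instance

-- ===== CLAIM (what is proved, stated in full; the proofs are below) =====
def Claim_equal_sum_upto_target : Prop := ∀ (n : Int), Dom_sum_upto_target n → Spec_sum_upto_target n (sum_upto_target n)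

-- ===== LEMMAS AND PROOFS =====

theorem pv_mod_two (x : Int) : PySem.Int.mod x 2 = x % 2 :=
  PySem.Int.mod_eq_emod_of_pos (by norm_num)

-- the innermost loop returns none when no element can complete the sum
theorem pvLoopD_none (n a b c : Int) (l : List Int)
    (h : ∀ x ∈ l, a + b + c + x ≠ n) : pvLoopD n a b c l = none := by
  induction l with
  | nil => rfl
  | cons d ds ih =>
    have hd : a + b + c + d ≠ n := h d (List.mem_cons_self ..)
    have ih' := ih (fun x hx => h x (List.mem_cons_of_mem _ hx))
    simp only [pvLoopD, pv_mod_two]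
    by_cases h1 : d % 2 = 0
    · simp [h1, hd, ih']
    · simp [h1, ih']

-- the innermost loop on its actual range: only d = n-a-b-c can match
theorem pvLoopD_eq (n a b c : Int) :
    pvLoopD n a b c (PySem.List.pyRange (n - a - b - c) 0 (-1)) =
      if 1 ≤ n - a - b - c ∧ (n - a - b - c) % 2 = 0
      then some [a, b, c, n - a - b - c] else none := by
  set m := n - a - b - c with hm
  by_cases hpos : 1 ≤ m
  · rw [PySem.List.pyRange_neg_one_cons (by omega)]
    simp only [pvLoopD, pv_mod_two]
    by_cases hev : m % 2 = 0
    · simp [hev, hpos]; omega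
    · have : pvLoopD n a b c (PySem.List.pyRange (m - 1) 0 (-1)) = none := by
        apply pvLoopD_none
        intro x hx
        have := (PySem.List.mem_pyRange_neg_one.mp hx)
        omega
      simp [hev, hpos, this]
  · rw [PySem.List.pyRange_neg_one_eq_nil (by omega)]
    simp only [pvLoopD]
    rw [if_neg (by omega)]

-- Generic countdown-search lemmas: a loop L that scans x = k, k-1, …, 1, skips
-- odd x, and returns inner x on the first even x with inner x ≠ none, where
-- inner on even x is some (g x) iff E ∧ x ≤ B (B even under E).
theorem pvScan_none (L : List Int → Option (List Int)) (inner : Int → Option (List Int))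
    (hnil : L [] = none)
    (hcons : ∀ x xs, L (x :: xs) =
      if ¬ PySem.Int.mod x 2 = 0 then L xs
      else match inner x with | some r => some r | none => L xs)
    (hinner : ∀ x, 0 < x → x % 2 = 0 → inner x = none)
    (l : List Int) (hl : ∀ x ∈ l, 0 < x) : L l = none := by
  induction l with
  | nil => exact hnil
  | cons x xs ih =>
    have ih' := ih (fun y hy => hl y (List.mem_cons_of_mem _ hy))
    rw [hcons, pv_mod_two]
    by_cases hev : x % 2 = 0
    · rw [hinner x (hl x (List.mem_cons_self ..)) hev]
      simpa [hev] using ih'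
    · simp [hev, ih']

theorem pvScan_some (L : List Int → Option (List Int)) (inner : Int → Option (List Int))
    (E : Prop) [Decidable E] (B : Int) (g : Int → List Int)
    (hcons : ∀ x xs, L (x :: xs) =
      if ¬ PySem.Int.mod x 2 = 0 then L xs
      else match inner x with | some r => some r | none => L xs)
    (hinner : ∀ x, x % 2 = 0 → inner x = if E ∧ x ≤ B then some (g x) else none)
    (hE : E) (hB2 : 2 ≤ B) (hBev : B % 2 = 0) :
    ∀ k, B ≤ k → L (PySem.List.pyRange k 0 (-1)) = some (g B) := by
  intro k hk
  induction k, hk using Int.le_induction with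
  | base =>
    rw [PySem.List.pyRange_neg_one_cons (by omega), hcons, pv_mod_two, hinner B hBev]
    simp [hBev, hE]
  | succ k hk ih =>
    rw [PySem.List.pyRange_neg_one_cons (by omega), hcons, pv_mod_two]
    by_cases hev : (k + 1) % 2 = 0
    · rw [hinner (k + 1) hev, if_neg (c := E ∧ k + 1 ≤ B) (by rintro ⟨-, h⟩; omega)]
      simpa [hev] using ih
    · simp [hev, ih]

-- level C: the c-loop on its actual range
theorem pvLoopC_eq (n a b : Int) :
    pvLoopC n a b (PySem.List.pyRange (n - a - b) 0 (-1)) =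
      if (n - a - b) % 2 = 0 ∧ 4 ≤ n - a - b
      then some [a, b, n - a - b - 2, 2] else none := by
  set s := n - a - b with hs
  have hcons : ∀ x xs, pvLoopC n a b (x :: xs) =
      if ¬ PySem.Int.mod x 2 = 0 then pvLoopC n a b xs
      else match pvLoopD n a b x (PySem.List.pyRange (n - a - b - x) 0 (-1)) with
        | some r => some r
        | none => pvLoopC n a b xs := fun x xs => rfl
  by_cases hcond : s % 2 = 0 ∧ 4 ≤ s
  · rw [if_pos hcond]
    have := pvScan_some (pvLoopC n a b)
      (fun c => pvLoopD n a b c (PySem.List.pyRange (n - a - b - c) 0 (-1)))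
      (s % 2 = 0) (s - 2) (fun c => [a, b, c, n - a - b - c])
      hcons
      (fun x hx => by
        beta_reduce
        rw [pvLoopD_eq]
        by_cases hE : s % 2 = 0 ∧ x ≤ s - 2
        · rw [if_pos (by omega), if_pos hE]
        · rw [if_neg (by omega), if_neg hE])
      hcond.1 (by omega) (by omega) s (by omega)
    rw [this]
    simp only [Option.some.injEq, List.cons.injEq, and_true, true_and]
    omega
  · rw [if_neg hcond]
    apply pvScan_none (pvLoopC n a b)
      (fun c => pvLoopD n a b c (PySem.List.pyRange (n - a - b - c) 0 (-1)))
      rfl hcons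
      (fun x hx hev => by beta_reduce; rw [pvLoopD_eq, if_neg (by omega)])
    intro x hx
    exact (PySem.List.mem_pyRange_neg_one.mp hx).1

-- level B: the b-loop on its actual range
theorem pvLoopB_eq (n a : Int) :
    pvLoopB n a (PySem.List.pyRange (n - a) 0 (-1)) =
      if (n - a) % 2 = 0 ∧ 6 ≤ n - a
      then some [a, n - a - 4, 2, 2] else none := by
  set t := n - a with ht
  have hcons : ∀ x xs, pvLoopB n a (x :: xs) =
      if ¬ PySem.Int.mod x 2 = 0 then pvLoopB n a xs
      else match pvLoopC n a x (PySem.List.pyRange (n - a - x) 0 (-1)) with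
        | some r => some r
        | none => pvLoopB n a xs := fun x xs => rfl
  by_cases hcond : t % 2 = 0 ∧ 6 ≤ t
  · rw [if_pos hcond]
    have := pvScan_some (pvLoopB n a)
      (fun b => pvLoopC n a b (PySem.List.pyRange (n - a - b) 0 (-1)))
      (t % 2 = 0) (t - 4) (fun b => [a, b, n - a - b - 2, 2])
      hcons
      (fun x hx => by
        beta_reduce
        rw [pvLoopC_eq]
        by_cases hE : t % 2 = 0 ∧ x ≤ t - 4
        · rw [if_pos (by constructor <;> omega), if_pos hE]
        · rw [if_neg (by omega), if_neg hE])
      hcond.1 (by omega) (by omega) t (by omega)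
    rw [this]
    simp only [Option.some.injEq, List.cons.injEq, and_true, true_and]
    omega
  · rw [if_neg hcond]
    apply pvScan_none (pvLoopB n a)
      (fun b => pvLoopC n a b (PySem.List.pyRange (n - a - b) 0 (-1)))
      rfl hcons
      (fun x hx hev => by beta_reduce; rw [pvLoopC_eq, if_neg (by omega)])
    intro x hx
    exact (PySem.List.mem_pyRange_neg_one.mp hx).1

-- level A: the a-loop on its actual range
theorem pvLoopA_eq (n : Int) :
    pvLoopA n (PySem.List.pyRange n 0 (-1)) =
      if n % 2 = 0 ∧ 8 ≤ n then some [n - 6, 2, 2, 2] else none := by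
  have hcons : ∀ x xs, pvLoopA n (x :: xs) =
      if ¬ PySem.Int.mod x 2 = 0 then pvLoopA n xs
      else match pvLoopB n x (PySem.List.pyRange (n - x) 0 (-1)) with
        | some r => some r
        | none => pvLoopA n xs := fun x xs => rfl
  by_cases hcond : n % 2 = 0 ∧ 8 ≤ n
  · rw [if_pos hcond]
    have := pvScan_some (pvLoopA n)
      (fun a => pvLoopB n a (PySem.List.pyRange (n - a) 0 (-1)))
      (n % 2 = 0) (n - 6) (fun a => [a, n - a - 4, 2, 2])
      hcons
      (fun x hx => by
        beta_reduce
        rw [pvLoopB_eq]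
        by_cases hE : n % 2 = 0 ∧ x ≤ n - 6
        · rw [if_pos (by constructor <;> omega), if_pos hE]
        · rw [if_neg (by omega), if_neg hE])
      hcond.1 (by omega) (by omega) n (by omega)
    rw [this]
    simp only [Option.some.injEq, List.cons.injEq, and_true, true_and]
    omega
  · rw [if_neg hcond]
    apply pvScan_none (pvLoopA n)
      (fun a => pvLoopB n a (PySem.List.pyRange (n - a) 0 (-1)))
      rfl hcons
      (fun x hx hev => by beta_reduce; rw [pvLoopB_eq, if_neg (by omega)])
    intro x hx
    exact (PySem.List.mem_pyRange_neg_one.mp hx).1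

-- ===== VERDICT (by name: the statement is the Claim_ definition above) =====
theorem sum_upto_target_spec : Claim_equal_sum_upto_target := by
  intro n _
  unfold Spec_sum_upto_target sum_upto_target sum_upto_target_alt
  rw [pvLoopA_eq, pv_mod_two]
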